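-- pv_equiv track=rewrite | github.com/tomasmb/arborschool-content | app/pdf-to-qti/services/content_order_extractor.py | extract_by_line_range
-- ===== SOURCE A (Python) =====
-- from typing import Dict, List, Tuple, Any
--
-- def extract_by_line_range(
--     line_index: Dict[int, str], start_line: int, end_line: int
-- ) -> str:
--     """Extract content from a range of lines (inclusive)."""
--     if start_line not in line_index:
--         raise ValueError(f"Start line not found: L{start_line}")
--     if end_line not in line_index:
--         raise ValueError(f"End line not found: L{end_line}")
--     if start_line > end_line:
--         raise ValueError(f"Start line L{start_line} is after end line L{end_line}")
--
--     content_parts = []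
--     for line_num in range(start_line, end_line + 1):
--         if line_num in line_index:
--             content_parts.append(line_index[line_num])
--
--     return "\n\n".join(content_parts)
-- ===== SOURCE B (Python) =====
-- def extract_by_line_range(line_index, start_line, end_line):
--     """Extract content from a range of lines (inclusive)."""
--     if start_line not in line_index:
--         raise ValueError(f"Start line not found: L{start_line}")
--     if end_line not in line_index:
--         raise ValueError(f"End line not found: L{end_line}")
--     if start_line > end_line:
--         raise ValueError(f"Start line L{start_line} is after end line L{end_line}")
--
--     keys = sorted(k for k in line_index if start_line <= k <= end_line)
--     return "\n\n".join(line_index[k] for k in keys)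
-- ===== Notes on version B (the rewrite author's own statement) =====
-- stated objective: alternative
-- what changed: Instead of scanning every integer in [start_line, end_line] and membership-testing each against the dict, B filters the dict's actual keys to the range, sorts them ascending and maps them to their values; Pre_ excludes exactly the inputs on which A raises ValueError (start or end not a key, or start > end).
import Mathlib
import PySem

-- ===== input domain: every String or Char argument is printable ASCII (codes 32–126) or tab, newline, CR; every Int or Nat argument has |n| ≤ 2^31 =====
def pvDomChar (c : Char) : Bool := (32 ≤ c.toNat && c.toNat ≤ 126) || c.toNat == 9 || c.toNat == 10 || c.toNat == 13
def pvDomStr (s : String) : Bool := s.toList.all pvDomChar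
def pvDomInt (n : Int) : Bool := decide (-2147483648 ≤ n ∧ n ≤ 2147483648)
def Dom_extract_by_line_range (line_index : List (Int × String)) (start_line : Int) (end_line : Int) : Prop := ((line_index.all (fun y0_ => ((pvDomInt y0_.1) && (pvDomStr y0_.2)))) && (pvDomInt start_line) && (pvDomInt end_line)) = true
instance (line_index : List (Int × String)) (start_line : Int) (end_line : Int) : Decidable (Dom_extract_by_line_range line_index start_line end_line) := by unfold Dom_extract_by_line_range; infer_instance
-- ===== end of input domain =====

-- B collects the dict's actual keys lying in [start_line, end_line], sorts them, and maps them to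
-- their values, instead of scanning every integer of the range; same validation, same result.

-- ===== PORT A =====
def extract_by_line_range (line_index : List (Int × String)) (start_line : Int) (end_line : Int) : String :=
  if (PySem.Dict.ofList line_index).contains start_line = false then ""  -- raise ValueError
  else if (PySem.Dict.ofList line_index).contains end_line = false then ""  -- raise ValueError
  else if start_line > end_line then ""  -- raise ValueError
  else
    PySem.Str.join "\n\n"
      ((PySem.List.pyRange start_line (end_line + 1) 1).foldl
        (fun content_parts line_num =>
          if (PySem.Dict.ofList line_index).contains line_num then
            content_parts ++ [(PySem.Dict.ofList line_index).getD line_num ""]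
          else content_parts) [])

-- ===== PORT B =====
def extract_by_line_range_alt (line_index : List (Int × String)) (start_line : Int) (end_line : Int) : String :=
  if (PySem.Dict.ofList line_index).contains start_line = false then ""  -- raise ValueError
  else if (PySem.Dict.ofList line_index).contains end_line = false then ""  -- raise ValueError
  else if start_line > end_line then ""  -- raise ValueError
  else
    let keys := PySem.List.sorted
      (((PySem.Dict.ofList line_index).keys).filter
        (fun k => decide (start_line ≤ k) && decide (k ≤ end_line)))
      (fun k => k) false
    PySem.Str.join "\n\n" (keys.map (fun k => (PySem.Dict.ofList line_index).getD k ""))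

-- ===== PRECONDITION & SPEC =====
-- Pre_ excludes exactly the inputs on which A raises ValueError: a missing start or end key, or start_line > end_line.
def Pre_extract_by_line_range (line_index : List (Int × String)) (start_line : Int) (end_line : Int) : Prop :=
  start_line ∈ line_index.map Prod.fst ∧ end_line ∈ line_index.map Prod.fst ∧ start_line ≤ end_line
instance (line_index : List (Int × String)) (start_line : Int) (end_line : Int) : Decidable (Pre_extract_by_line_range line_index start_line end_line) := by unfold Pre_extract_by_line_range; infer_instance

def pvWitness_extract_by_line_range : (List (Int × String)) × Int × Int := ([(1, "alpha"), (3, "gamma")], 1, 3)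

def Spec_extract_by_line_range (line_index : List (Int × String)) (start_line : Int) (end_line : Int) (out : String) : Prop := out = extract_by_line_range_alt line_index start_line end_line
instance (line_index : List (Int × String)) (start_line : Int) (end_line : Int) (out : String) : Decidable (Spec_extract_by_line_range line_index start_line end_line out) := by unfold Spec_extract_by_line_range; infer_instance

-- ===== CLAIM (what is proved, stated in full; the proofs are below) =====
def Claim_equal_extract_by_line_range : Prop := ∀ (line_index : List (Int × String)) (start_line : Int) (end_line : Int), Dom_extract_by_line_range line_index start_line end_line → Pre_extract_by_line_range line_index start_line end_line → Spec_extract_by_line_range line_index start_line end_line (extract_by_line_range line_index start_line end_line)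

-- ===== LEMMAS AND PROOFS =====

-- Membership in the dict built from the association list is membership among the first components.
theorem contains_ofList_iff (li : List (Int × String)) (k : Int) :
    (PySem.Dict.ofList li).contains k = true ↔ k ∈ li.map Prod.fst := by
  rw [PySem.Dict.contains_iff_mem_keys]
  show k ∈ (li.foldl (fun d p => d.insert p.1 p.2) PySem.Dict.empty).keys ↔ _
  rw [PySem.Dict.keys_foldl_insert_key]
  exact PySem.Set.mem_ofList _ _

-- The integers of [start, end] that are keys, in increasing order, are exactly the sorted
-- in-range keys of the dict.
theorem range_filter_eq_sorted_keys (li : List (Int × String)) (s e : Int) :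
    PySem.List.sorted
      (((PySem.Dict.ofList li).keys).filter (fun k => decide (s ≤ k) && decide (k ≤ e)))
      (fun k => k) false
    = (PySem.List.pyRange s (e + 1) 1).filter (fun k => (PySem.Dict.ofList li).contains k) := by
  apply PySem.List.sorted_eq_of_perm_of_pairwise_lt
  · rw [List.perm_ext_iff_of_nodup]
    · intro a
      simp only [List.mem_filter, PySem.List.mem_pyRange_one, Bool.and_eq_true, decide_eq_true_eq,
        ← PySem.Dict.contains_iff_mem_keys]
      constructor
      · rintro ⟨⟨h1, h2⟩, h3⟩
        exact ⟨h3, h1, by omega⟩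
      · rintro ⟨h3, h1, h2⟩
        exact ⟨⟨h1, by omega⟩, h3⟩
    · exact (PySem.List.nodup_pyRange_one s (e + 1)).filter _
    · exact (PySem.Dict.nodup_keys_ofList li).filter _
  · exact (PySem.List.pairwise_lt_pyRange_one s (e + 1)).filter _

-- ===== VERDICT (by name: the statement is the Claim_ definition above) =====
theorem extract_by_line_range_spec : Claim_equal_extract_by_line_range := by
  intro li s e _hdom hpre
  obtain ⟨hs, he, hle⟩ := hpre
  have hcs : (PySem.Dict.ofList li).contains s = true := (contains_ofList_iff li s).mpr hs
  have hce : (PySem.Dict.ofList li).contains e = true := (contains_ofList_iff li e).mpr he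
  unfold Spec_extract_by_line_range extract_by_line_range extract_by_line_range_alt
  rw [hcs, hce]
  simp only [Bool.true_eq_false, if_false, if_neg (by omega : ¬ s > e)]
  rw [PySem.List.foldl_append_if, List.nil_append, range_filter_eq_sorted_keys]
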